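-- pv_equiv track=rewrite | github.com/chdickey/AOC2024 | day_12.py | __find_top_left
-- ===== SOURCE A (Python) =====
-- def __find_top_left(positions):
--     if positions == None or len(positions) <= 0:
--         return None
--     top = 999999
--     left = 999999
--     for position in positions:
--         if position[0] < top:
--             top = position[0]
--     for position in positions:
--         if position[0] == top and position[1] < left:
--             left = position[1]
--     return (top, left)
-- ===== SOURCE B (Python) =====
-- def __find_top_left(positions):
--     if positions is None or len(positions) <= 0:
--         return None
--     top = 999999
--     left = 999999
--     for p in positions:
--         if p[0] < top:
--             top = p[0]
--             left = 999999
--         if p[0] == top and p[1] < left: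
--             left = p[1]
--     return (top, left)
-- ===== Notes on version B (the rewrite author's own statement) =====
-- stated objective: alternative
-- what changed: Replaces A's two staged passes (first find the minimal row, then scan again for the minimal column in that row) with one single pass that maintains the running best (top,left) pair, resetting left to the 999999 sentinel whenever a new smaller row is found.
import Mathlib
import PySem

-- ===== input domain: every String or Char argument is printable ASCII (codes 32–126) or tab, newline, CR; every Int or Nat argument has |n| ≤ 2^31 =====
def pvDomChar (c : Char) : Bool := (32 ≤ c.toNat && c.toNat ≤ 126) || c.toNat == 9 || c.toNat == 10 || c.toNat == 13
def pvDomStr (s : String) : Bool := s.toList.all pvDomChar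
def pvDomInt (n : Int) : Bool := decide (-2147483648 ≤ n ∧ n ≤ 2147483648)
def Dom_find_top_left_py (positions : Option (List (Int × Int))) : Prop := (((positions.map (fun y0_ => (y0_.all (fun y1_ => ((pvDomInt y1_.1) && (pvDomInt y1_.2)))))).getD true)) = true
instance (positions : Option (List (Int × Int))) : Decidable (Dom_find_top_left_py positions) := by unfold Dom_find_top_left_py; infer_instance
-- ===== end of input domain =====

-- B folds A's two staged passes into one pass keeping a running (top,left) pair; objective: alternative.

-- ===== PORT A =====
def find_top_left_py (positions : Option (List (Int × Int))) : Option (Int × Int) :=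
  match positions with
  | none => none
  | some xs =>
    if xs.length ≤ 0 then none
    else
      let top := xs.foldl (fun t p => if p.1 < t then p.1 else t) 999999
      let left := xs.foldl (fun l p => if p.1 = top ∧ p.2 < l then p.2 else l) 999999
      some (top, left)

-- ===== PORT B =====
-- single-pass loop body: first update (top,left) on a new minimal row, then update left
def find_top_left_step (s : Int × Int) (p : Int × Int) : Int × Int :=
  let s1 := if p.1 < s.1 then (p.1, (999999 : Int)) else s
  if p.1 = s1.1 ∧ p.2 < s1.2 then (s1.1, p.2) else s1

def find_top_left_py_alt (positions : Option (List (Int × Int))) : Option (Int × Int) :=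
  match positions with
  | none => none
  | some xs =>
    if xs.length ≤ 0 then none
    else some (xs.foldl find_top_left_step (999999, 999999))

-- ===== PRECONDITION & SPEC =====
def Spec_find_top_left_py (positions : Option (List (Int × Int))) (out : Option (Int × Int)) : Prop := out = find_top_left_py_alt positions
instance (positions : Option (List (Int × Int))) (out : Option (Int × Int)) : Decidable (Spec_find_top_left_py positions out) := by unfold Spec_find_top_left_py; infer_instance

-- ===== CLAIM (what is proved, stated in full; the proofs are below) =====
def Claim_equal_find_top_left_py : Prop := ∀ (positions : Option (List (Int × Int))), Dom_find_top_left_py positions → Spec_find_top_left_py positions (find_top_left_py positions)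

-- ===== LEMMAS AND PROOFS =====

theorem fold_min_le (xs : List (Int × Int)) (t : Int) :
    xs.foldl (fun t p => if p.1 < t then p.1 else t) t ≤ t := by
  induction xs generalizing t with
  | nil => simp
  | cons p r ih =>
    simp only [List.foldl_cons]
    split_ifs with h
    · exact le_trans (ih p.1) (le_of_lt h)
    · exact ih t

-- the single-pass fold equals (A's first fold, A's second fold with adjusted init)
theorem step_fold_pair (xs : List (Int × Int)) (t l : Int) :
    xs.foldl find_top_left_step (t, l)
      = (xs.foldl (fun t p => if p.1 < t then p.1 else t) t,
         xs.foldl (fun l p => if p.1 = xs.foldl (fun t p => if p.1 < t then p.1 else t) t ∧ p.2 < l then p.2 else l)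
           (if t = xs.foldl (fun t p => if p.1 < t then p.1 else t) t then l else 999999)) := by
  induction xs generalizing t l with
  | nil => simp
  | cons p r ih =>
    have hM : (p :: r).foldl (fun t p => if p.1 < t then p.1 else t) t
        = r.foldl (fun t p => if p.1 < t then p.1 else t) (if p.1 < t then p.1 else t) := by
      simp
    by_cases h : p.1 < t
    · -- new minimal row: reset
      have hstep : find_top_left_step (t, l) p
          = (p.1, if p.2 < 999999 then p.2 else (999999 : Int)) := by
        simp only [find_top_left_step, if_pos h]
        split_ifs with h2 h3 <;> simp_all
      have hMle : r.foldl (fun t p => if p.1 < t then p.1 else t) p.1 ≤ p.1 := fold_min_le r p.1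
      simp only [List.foldl_cons, hstep, ih, hM, if_pos h]
      refine congrArg (Prod.mk _) ?_
      -- initial values of the second fold agree
      congr 1
      split_ifs <;> omega
    · -- row not smaller: only the left-update can fire
      have hstep : find_top_left_step (t, l) p
          = (t, if p.1 = t ∧ p.2 < l then p.2 else l) := by
        simp only [find_top_left_step, if_neg h]
        split_ifs with h2 <;> simp_all
      have hMle : r.foldl (fun t p => if p.1 < t then p.1 else t) t ≤ t := fold_min_le r t
      simp only [List.foldl_cons, hstep, ih, hM, if_neg h]
      refine congrArg (Prod.mk _) ?_
      congr 1
      split_ifs <;> omega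

-- ===== VERDICT (by name: the statement is the Claim_ definition above) =====
theorem find_top_left_py_spec : Claim_equal_find_top_left_py := by
  intro positions _
  unfold Spec_find_top_left_py find_top_left_py find_top_left_py_alt
  cases positions with
  | none => rfl
  | some xs =>
    cases xs with
    | nil => rfl
    | cons p r =>
      simp only [List.length_cons]
      rw [if_neg (by omega), if_neg (by omega)]
      rw [step_fold_pair]
      split_ifs <;> rfl
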